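-- pv_equiv track=rewrite | github.com/giladfeldman/docpluck | docpluck/tables/cell_cleaning.py | _split_mashed_cell
-- ===== SOURCE A (Python) =====
-- _MERGE_SEPARATOR = "\x00BR\x00"  # placeholder swapped to <br> after escaping
--
-- def _split_mashed_cell(s: str) -> str:
--     """Insert ``<br>`` at apparent column-undercount boundaries inside a cell."""
--     if not s or len(s) < 6:
--         return s
--     out: list[str] = []
--     i = 0
--     n = len(s)
--     while i < n:
--         out.append(s[i])
--         if i + 1 < n:
--             cur, nxt = s[i], s[i + 1]
--             split_here = False
--
--             if cur.islower() and nxt.isupper():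
--                 left = i
--                 while left > 0 and s[left - 1].islower():
--                     left -= 1
--                 run_len = i - left + 1
--                 if run_len >= 4:
--                     split_here = True
--                 elif (
--                     run_len >= 3
--                     and (left == 0 or s[left - 1].isspace())
--                     and i + 2 < n
--                     and s[i + 2].islower()
--                 ):
--                     split_here = True
--
--             elif (
--                 cur.isalpha()
--                 and nxt.isdigit()
--                 and (
--                     i + 2 >= n
--                     or s[i + 2].isdigit()
--                     or s[i + 2] in " .,"
--                 )
--             ):
--                 left = i
--                 while left > 0 and s[left - 1].isalpha():
--                     left -= 1
--                 word_len = i - left + 1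
--                 if word_len >= 4:
--                     split_here = True
--
--             if split_here:
--                 out.append(_MERGE_SEPARATOR)
--         i += 1
--     return "".join(out)
-- ===== SOURCE B (Python) =====
-- _MERGE_SEPARATOR = "\x00BR\x00"
--
-- def _split_mashed_cell(s: str) -> str:
--     """Insert ``<br>`` at apparent column-undercount boundaries inside a cell."""
--     if not s or len(s) < 6:
--         return s
--     chars = list(s)
--     pieces = []
--     lr = 0          # consecutive lowercase chars ending at cur (inclusive)
--     ar = 0          # consecutive alpha chars ending at cur (inclusive)
--     ctx = None      # char just before the current lowercase run (None = run starts the string)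
--     prev = None
--     for cur, nxt, nxt2 in zip(chars, chars[1:] + [None], chars[2:] + [None, None]):
--         if lr == 0:
--             ctx = prev
--         lr = lr + 1 if cur.islower() else 0
--         ar = ar + 1 if cur.isalpha() else 0
--         pieces.append(cur)
--         split_here = False
--         if nxt is not None:
--             if cur.islower() and nxt.isupper():
--                 split_here = lr >= 4 or (
--                     lr == 3
--                     and (ctx is None or ctx.isspace())
--                     and nxt2 is not None
--                     and nxt2.islower()
--                 )
--             elif cur.isalpha() and nxt.isdigit() and (
--                 nxt2 is None or nxt2.isdigit() or nxt2 in " .,"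
--             ):
--                 split_here = ar >= 4
--         if split_here:
--             pieces.append(_MERGE_SEPARATOR)
--         prev = cur
--     return "".join(pieces)
-- ===== Notes on version B (the rewrite author's own statement) =====
-- stated objective: alternative
-- what changed: B removes all string indexing and both backward while-scans: it is an index-free state machine over (cur, nxt, nxt2) triples from zipped shifted copies of the string, carrying the lowercase/alpha run counters and the character preceding the current lowercase run, and collects pieces joined at the end.
import Mathlib
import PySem

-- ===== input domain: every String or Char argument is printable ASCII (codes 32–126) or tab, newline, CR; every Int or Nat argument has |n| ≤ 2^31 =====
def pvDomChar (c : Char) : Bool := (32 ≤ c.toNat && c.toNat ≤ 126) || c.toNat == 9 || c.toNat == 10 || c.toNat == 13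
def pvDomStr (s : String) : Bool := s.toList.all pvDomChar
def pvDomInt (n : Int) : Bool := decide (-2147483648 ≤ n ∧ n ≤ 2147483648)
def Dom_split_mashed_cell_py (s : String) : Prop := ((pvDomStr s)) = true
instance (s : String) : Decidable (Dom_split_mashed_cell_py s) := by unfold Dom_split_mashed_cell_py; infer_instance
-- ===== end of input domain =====

-- B drops A's indices and backward while-scans altogether: an index-free state machine
-- over (cur, nxt, nxt2) triples carrying run counters and the run-context character
-- (objective: alternative decomposition, same observable behaviour).

-- ===== PORT A =====
def pvSep : List Char := [Char.ofNat 0, 'B', 'R', Char.ofNat 0]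

-- the backward `while left > 0 and s[left-1].<p>(): left -= 1` loops of A
def pvBackScan (p : Char → Bool) (cs : List Char) : Nat → Nat
  | 0 => 0
  | l + 1 => if p (cs.getD l ' ') then pvBackScan p cs l else l + 1

-- the body computing A's `split_here` at position i (branches in A's order)
def pvSplitA (cs : List Char) (i : Nat) : Bool :=
  if i + 1 < cs.length then
    let cur := cs.getD i ' '
    let nxt := cs.getD (i + 1) ' '
    if PySem.Chars.islower cur && PySem.Chars.isupper nxt then
      let left := pvBackScan PySem.Chars.islower cs i
      let runLen := i - left + 1
      if 4 ≤ runLen then true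
      else if decide (3 ≤ runLen) &&
              (if left == 0 then true else PySem.Chars.isspace (cs.getD (left - 1) ' ')) &&
              decide (i + 2 < cs.length) &&
              PySem.Chars.islower (cs.getD (i + 2) ' ') then true
      else false
    else if PySem.Chars.isalpha cur && PySem.Chars.isdigit nxt &&
            (decide (cs.length ≤ i + 2) || PySem.Chars.isdigit (cs.getD (i + 2) ' ') ||
             (cs.getD (i + 2) ' ' == ' ' || cs.getD (i + 2) ' ' == '.' || cs.getD (i + 2) ' ' == ',')) then
      let left := pvBackScan PySem.Chars.isalpha cs i
      let wordLen := i - left + 1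
      decide (4 ≤ wordLen)
    else false
  else false

def pvGoA (cs : List Char) (i : Nat) : List Char :=
  if _h : i < cs.length then
    cs.getD i ' ' :: ((if pvSplitA cs i then pvSep else []) ++ pvGoA cs (i + 1))
  else []
termination_by cs.length - i

def split_mashed_cell_py (s : String) : String :=
  if s.toList.length < 6 then s else String.ofList (pvGoA s.toList 0)

-- ===== PORT B =====
-- B's `split_here` from cur, the tail after cur, and the updated counters/context
def pvSplitB (c : Char) (rest : List Char) (lr ar : Nat) (ctx : Option Char) : Bool :=
  match rest with
  | [] => false
  | nxt :: rest2 =>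
    if PySem.Chars.islower c && PySem.Chars.isupper nxt then
      decide (4 ≤ lr) ||
        (decide (lr = 3) &&
         (match ctx with | none => true | some ch => PySem.Chars.isspace ch) &&
         (match rest2 with | [] => false | n2 :: _ => PySem.Chars.islower n2))
    else if PySem.Chars.isalpha c && PySem.Chars.isdigit nxt &&
            (match rest2 with
             | [] => true
             | n2 :: _ => PySem.Chars.isdigit n2 || (n2 == ' ' || n2 == '.' || n2 == ',')) then
      decide (4 ≤ ar)
    else false

-- the single forward pass: structural recursion on the remaining characters,
-- state = (lower run, alpha run, char before the current lowercase run, previous char)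
def pvGoB : List Char → Nat → Nat → Option Char → Option Char → List Char
  | [], _, _, _, _ => []
  | c :: rest, lr, ar, ctx, prev =>
    let ctx' := if lr == 0 then prev else ctx
    let lr' := if PySem.Chars.islower c then lr + 1 else 0
    let ar' := if PySem.Chars.isalpha c then ar + 1 else 0
    c :: ((if pvSplitB c rest lr' ar' ctx' then pvSep else []) ++ pvGoB rest lr' ar' ctx' (some c))

def split_mashed_cell_py_alt (s : String) : String :=
  if s.toList.length < 6 then s else String.ofList (pvGoB s.toList 0 0 none none)

-- ===== PRECONDITION & SPEC =====
def Spec_split_mashed_cell_py (s : String) (out : String) : Prop := out = split_mashed_cell_py_alt s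
instance (s : String) (out : String) : Decidable (Spec_split_mashed_cell_py s out) := by unfold Spec_split_mashed_cell_py; infer_instance

-- ===== CLAIM (what is proved, stated in full; the proofs are below) =====
def Claim_equal_split_mashed_cell_py : Prop := ∀ (s : String), Dom_split_mashed_cell_py s → Spec_split_mashed_cell_py s (split_mashed_cell_py s)

-- ===== LEMMAS AND PROOFS =====
-- length of the run of p-chars ending just before index i (B's counter on entering step i)
def pvCnt (p : Char → Bool) (cs : List Char) : Nat → Nat
  | 0 => 0
  | i + 1 => if p (cs.getD i ' ') then pvCnt p cs i + 1 else 0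

theorem pvCnt_le (p : Char → Bool) (cs : List Char) (i : Nat) : pvCnt p cs i ≤ i := by
  induction i with
  | zero => simp [pvCnt]
  | succ i ih => simp only [pvCnt]; split <;> omega

theorem pvBackScan_eq (p : Char → Bool) (cs : List Char) (i : Nat) :
    pvBackScan p cs i = i - pvCnt p cs i := by
  induction i with
  | zero => rfl
  | succ i ih =>
    have := pvCnt_le p cs i
    simp only [pvBackScan, pvCnt]
    split <;> omega

-- the context invariant: ctx is what B must carry when the incoming lower run is lr at step i
def pvCtxSpec (cs : List Char) (i lr : Nat) : Option Char :=
  if i - lr = 0 then none else some (cs.getD (i - lr - 1) ' ')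

set_option maxRecDepth 8000 in
theorem pvSplit_eq (cs : List Char) (i : Nat) (hi : i < cs.length) (ctx : Option Char)
    (hctx : 0 < pvCnt PySem.Chars.islower cs (i + 1) →
      ctx = pvCtxSpec cs (i + 1) (pvCnt PySem.Chars.islower cs (i + 1))) :
    pvSplitA cs i =
      pvSplitB (cs.getD i ' ') (cs.drop (i + 1))
        (pvCnt PySem.Chars.islower cs (i + 1)) (pvCnt PySem.Chars.isalpha cs (i + 1)) ctx := by
  by_cases h1 : i + 1 < cs.length
  · have hnext : cs[i + 1] = cs.getD (i + 1) ' ' := (List.getD_eq_getElem cs ' ' h1).symm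
    rw [pvSplitA, if_pos h1, List.drop_eq_getElem_cons h1]
    simp only [pvSplitB, hnext, pvBackScan_eq]
    have hRle := pvCnt_le PySem.Chars.islower cs i
    have hAle := pvCnt_le PySem.Chars.isalpha cs i
    cases hg1 : (PySem.Chars.islower (cs.getD i ' ') && PySem.Chars.isupper (cs.getD (i + 1) ' ')) with
    | true =>
      simp only [if_true]
      have hlo : PySem.Chars.islower (cs.getD i ' ') = true := by
        revert hg1; cases PySem.Chars.islower (cs.getD i ' ') <;> simp
      have hc1 : pvCnt PySem.Chars.islower cs (i + 1) = pvCnt PySem.Chars.islower cs i + 1 := by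
        rw [pvCnt, if_pos hlo]
      set R := pvCnt PySem.Chars.islower cs i with hR
      have e1 : i - (i - R) + 1 = R + 1 := by omega
      rw [hc1, e1]
      by_cases h4 : 4 ≤ R + 1
      · simp [h4]
      · rw [if_neg h4]
        have hdec4 : decide (4 ≤ R + 1) = false := by simp [h4]
        have hctxv : ctx = pvCtxSpec cs (i + 1) (R + 1) := by
          rw [hctx (by omega), hc1]
        have e2 : i + 1 - (R + 1) = i - R := by omega
        rw [hdec4, Bool.false_or]
        have h3 : decide (3 ≤ R + 1) = decide (R + 1 = 3) := decide_eq_decide.mpr (by omega)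
        rw [h3, hctxv, pvCtxSpec, e2]
        by_cases h2 : i + 2 < cs.length
        · rw [List.drop_eq_getElem_cons h2]
          have hn2 : cs[i + 2] = cs.getD (i + 2) ' ' := (List.getD_eq_getElem cs ' ' h2).symm
          have hd2t : decide (i + 2 < cs.length) = true := decide_eq_true h2
          by_cases hz : i - R = 0
          · rw [if_pos hz, hz, hn2]
            cases h3b : decide (R + 1 = 3) <;>
              cases hw : PySem.Chars.islower (cs[i + 2]?.getD ' ') <;>
                simp [hw, hd2t]
          · rw [if_neg hz]
            have hbz : (i - R == 0) = false := by simpa using hz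
            rw [hbz, hn2]
            cases h3b : decide (R + 1 = 3) <;>
              cases hsp : PySem.Chars.isspace (cs[i - R - 1]?.getD ' ') <;>
                cases hw : PySem.Chars.islower (cs[i + 2]?.getD ' ') <;>
                  simp [hsp, hw, hd2t]
        · have hd2 : List.drop (i + 2) cs = [] := List.drop_eq_nil_of_le (by omega)
          by_cases hz : i - R = 0
          · rw [if_pos hz, hd2]
            simp [hz, h2]
          · rw [if_neg hz, hd2]
            have hbz : (i - R == 0) = false := by simpa using hz
            simp [hbz, h2]
    | false =>
      simp only [Bool.false_eq_true, if_false]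
      -- second branch: first align the guards, then the bodies
      by_cases h2 : i + 2 < cs.length
      · rw [List.drop_eq_getElem_cons h2]
        have hn2 : cs[i + 2] = cs.getD (i + 2) ' ' := (List.getD_eq_getElem cs ' ' h2).symm
        have hdle : decide (cs.length ≤ i + 2) = false := by simp; omega
        cases hal : PySem.Chars.isalpha (cs.getD i ' ') with
        | false => simp [hdle, hn2]
        | true =>
          have hca : pvCnt PySem.Chars.isalpha cs (i + 1) = pvCnt PySem.Chars.isalpha cs i + 1 := by
            rw [pvCnt, if_pos hal]
          have e3 : i - (i - pvCnt PySem.Chars.isalpha cs i) + 1 = pvCnt PySem.Chars.isalpha cs i + 1 := by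
            omega
          simp only [hdle, hn2, hca, e3, Bool.false_or, Bool.true_and]
      · have hd2 : List.drop (i + 2) cs = [] := List.drop_eq_nil_of_le (by omega)
        rw [hd2]
        have hdle : decide (cs.length ≤ i + 2) = true := by simp; omega
        cases hal : PySem.Chars.isalpha (cs.getD i ' ') with
        | false => simp [hdle]
        | true =>
          have hca : pvCnt PySem.Chars.isalpha cs (i + 1) = pvCnt PySem.Chars.isalpha cs i + 1 := by
            rw [pvCnt, if_pos hal]
          have e3 : i - (i - pvCnt PySem.Chars.isalpha cs i) + 1 = pvCnt PySem.Chars.isalpha cs i + 1 := by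
            omega
          simp only [hdle, hca, e3, Bool.true_or, Bool.true_and, Bool.and_true]
  · rw [pvSplitA, if_neg h1, List.drop_eq_nil_of_le (by omega)]
    rfl

theorem pvGo_eq (cs : List Char) (k i lr ar : Nat) (ctx prev : Option Char)
    (hk : cs.length - i ≤ k)
    (hlr : lr = pvCnt PySem.Chars.islower cs i)
    (har : ar = pvCnt PySem.Chars.isalpha cs i)
    (hprev : prev = if i = 0 then none else some (cs.getD (i - 1) ' '))
    (hctx : 0 < lr → ctx = pvCtxSpec cs i lr) :
    pvGoB (cs.drop i) lr ar ctx prev = pvGoA cs i := by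
  induction k generalizing i lr ar ctx prev with
  | zero =>
    have hi : ¬ i < cs.length := by omega
    rw [List.drop_eq_nil_of_le (by omega), pvGoA, dif_neg hi]
    rfl
  | succ k ih =>
    by_cases hi : i < cs.length
    · rw [List.drop_eq_getElem_cons hi, pvGoA, dif_pos hi]
      have hget : cs[i] = cs.getD i ' ' := (List.getD_eq_getElem cs ' ' hi).symm
      rw [pvGoB]
      simp only [hget]
      have hlr' : (if PySem.Chars.islower (cs.getD i ' ') then lr + 1 else 0)
          = pvCnt PySem.Chars.islower cs (i + 1) := by rw [hlr]; rfl
      have har' : (if PySem.Chars.isalpha (cs.getD i ' ') then ar + 1 else 0)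
          = pvCnt PySem.Chars.isalpha cs (i + 1) := by rw [har]; rfl
      have hle := pvCnt_le PySem.Chars.islower cs i
      have hctx' : 0 < pvCnt PySem.Chars.islower cs (i + 1) →
          (if lr == 0 then prev else ctx) = pvCtxSpec cs (i + 1) (pvCnt PySem.Chars.islower cs (i + 1)) := by
        intro hpos
        have hlow : PySem.Chars.islower (cs.getD i ' ') = true := by
          by_contra hno
          rw [Bool.not_eq_true] at hno
          rw [pvCnt, hno] at hpos
          simp at hpos
        have hc1 : pvCnt PySem.Chars.islower cs (i + 1) = pvCnt PySem.Chars.islower cs i + 1 := by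
          rw [pvCnt, if_pos hlow]
        by_cases h0 : lr = 0
        · rw [if_pos (by simp [h0]), hprev, hc1, ← hlr, h0, pvCtxSpec]
          have e : i + 1 - (0 + 1) = i := by omega
          rw [e]
        · have hpos0 : 0 < lr := by omega
          rw [if_neg (by simpa using h0), hctx hpos0, hc1, ← hlr, pvCtxSpec, pvCtxSpec]
          have e : i + 1 - (lr + 1) = i - lr := by omega
          rw [e]
      rw [hlr', har']
      rw [← pvSplit_eq cs i hi _ hctx']
      have hprev1 : some (cs.getD i ' ')
          = if i + 1 = 0 then none else some (cs.getD (i + 1 - 1) ' ') := by simp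
      rw [ih (i + 1) _ _ _ _ (by omega) rfl rfl hprev1 hctx']
    · rw [List.drop_eq_nil_of_le (by omega), pvGoA, dif_neg hi]
      rfl

-- ===== VERDICT (by name: the statement is the Claim_ definition above) =====
theorem split_mashed_cell_py_spec : Claim_equal_split_mashed_cell_py := by
  intro s _
  unfold Spec_split_mashed_cell_py split_mashed_cell_py split_mashed_cell_py_alt
  split
  · rfl
  · rw [← pvGo_eq s.toList s.toList.length 0 0 0 none none (by omega) rfl rfl rfl (by omega)]
    rfl
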